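-- pv_equiv track=rewrite | github.com/Decolo/resume-agent | resume_agent/domain/job_matcher.py | _strip_bullet
-- ===== SOURCE A (Python) =====
-- def _strip_bullet(line: str) -> str:
--     text = line.strip()
--     for prefix in ("- ", "* ", "• "):
--         if text.startswith(prefix):
--             return text[len(prefix) :].strip()
--
--     idx = 0
--     while idx < len(text) and text[idx].isdigit():
--         idx += 1
--     if idx > 0 and idx + 1 < len(text) and text[idx] in (".", ")") and text[idx + 1] == " ":
--         return text[idx + 2 :].strip()
--     return text
-- ===== SOURCE B (Python) =====
-- def _strip_bullet(line: str) -> str: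
--     text = line.strip()
--     first, sep, rest = text.partition(" ")
--     if sep and (first in ("-", "*", "•") or (first[:-1].isdigit() and first.endswith((".", ")")))):
--         return rest.strip()
--     return text
-- ===== Notes on version B (the rewrite author's own statement) =====
-- stated objective: simpler
-- what changed: B replaces A's startswith-prefix chain and the explicit digit-scanning while-loop by a single partition at the first space followed by a classification of the first token (bullet symbol, or digits ending in '.'/')').
import Mathlib
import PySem

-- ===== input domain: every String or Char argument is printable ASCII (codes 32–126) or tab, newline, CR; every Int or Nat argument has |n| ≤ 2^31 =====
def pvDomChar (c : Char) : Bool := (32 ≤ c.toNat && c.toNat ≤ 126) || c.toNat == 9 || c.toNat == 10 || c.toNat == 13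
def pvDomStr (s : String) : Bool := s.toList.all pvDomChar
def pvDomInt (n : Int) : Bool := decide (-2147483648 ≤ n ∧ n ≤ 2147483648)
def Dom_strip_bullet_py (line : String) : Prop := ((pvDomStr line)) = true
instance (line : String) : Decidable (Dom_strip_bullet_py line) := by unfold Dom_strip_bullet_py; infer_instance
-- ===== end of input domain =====

-- B replaces A's startswith chain and index-scanning while-loop by one partition at the
-- first space followed by a classification of the first token (objective: simpler).

-- ===== PORT A =====
-- 'idx = 0; while idx < len(text) and text[idx].isdigit(): idx += 1' — the obvious
-- structural recursion counting the leading digits of the remaining characters.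
def stripBulletDigits : List Char → Nat
  | [] => 0
  | c :: r => if PySem.Chars.isdigit c then stripBulletDigits r + 1 else 0

def stripBulletCoreA (t : List Char) : List Char :=
  -- 'for prefix in ("- ", "* ", "• "):' unrolled in order
  if PySem.Chars.startswith t ['-', ' '] then PySem.Chars.strip (PySem.List.slice t (some 2) none)
  else if PySem.Chars.startswith t ['*', ' '] then PySem.Chars.strip (PySem.List.slice t (some 2) none)
  else if PySem.Chars.startswith t ['•', ' '] then PySem.Chars.strip (PySem.List.slice t (some 2) none)
  else
    let idx := stripBulletDigits t
    if 0 < idx ∧ idx + 1 < t.length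
        ∧ (PySem.List.pyGet? t (idx : Int) = some '.' ∨ PySem.List.pyGet? t (idx : Int) = some ')')
        ∧ PySem.List.pyGet? t ((idx : Int) + 1) = some ' '
    then PySem.Chars.strip (PySem.List.slice t (some ((idx : Int) + 2)) none)
    else t

def strip_bullet_py (line : String) : String :=
  String.ofList (stripBulletCoreA (PySem.Chars.strip line.toList))

-- ===== PORT B =====
def stripBulletCoreB (t : List Char) : List Char :=
  -- text.partition(" ") ported by hand (exact): split at the first occurrence of " ";
  -- if there is none, sep == "" and the guard 'sep and …' is false.
  let i := PySem.Chars.find t [' ']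
  if i = -1 then t
  else
    let first := PySem.List.slice t none (some i)
    let rest := PySem.List.slice t (some (i + 1)) none
    if (first = ['-'] ∨ first = ['*'] ∨ first = ['•'])
        ∨ (PySem.Chars.strIsdigit (PySem.List.slice first none (some (-1)))
            ∧ (PySem.Chars.endswith first ['.'] ∨ PySem.Chars.endswith first [')']))
    then PySem.Chars.strip rest
    else t

def strip_bullet_py_alt (line : String) : String :=
  String.ofList (stripBulletCoreB (PySem.Chars.strip line.toList))

-- ===== PRECONDITION & SPEC =====
def Spec_strip_bullet_py (line : String) (out : String) : Prop := out = strip_bullet_py_alt line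
instance (line : String) (out : String) : Decidable (Spec_strip_bullet_py line out) := by unfold Spec_strip_bullet_py; infer_instance

-- ===== CLAIM (what is proved, stated in full; the proofs are below) =====
def Claim_equal_strip_bullet_py : Prop := ∀ (line : String), Dom_strip_bullet_py line → Spec_strip_bullet_py line (strip_bullet_py line)

-- ===== LEMMAS AND PROOFS =====

lemma singleton_prefix_iff (c : Char) (l : List Char) : [c] <+: l ↔ l.head? = some c := by
  cases l <;> simp [List.cons_prefix_cons, eq_comm]

-- leading-digit-count facts
lemma stripBulletDigits_append (ds r : List Char) (h : ∀ c ∈ ds, PySem.Chars.isdigit c = true)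
    (hr : ∀ c, r.head? = some c → PySem.Chars.isdigit c = false) :
    stripBulletDigits (ds ++ r) = ds.length := by
  induction ds with
  | nil =>
    cases hr' : r with
    | nil => simp [stripBulletDigits]
    | cons c r' =>
      have := hr c (by simp [hr'])
      simp [stripBulletDigits, this]
  | cons c ds ih =>
    have hc := h c (by simp)
    simp only [List.cons_append, stripBulletDigits, hc, if_true,
      ih (fun x hx => h x (by simp [hx]))]
    simp

lemma stripBulletDigits_take (t : List Char) :
    ∀ c ∈ t.take (stripBulletDigits t), PySem.Chars.isdigit c = true := by
  induction t with
  | nil => simp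
  | cons c r ih =>
    intro x hx
    by_cases hc : PySem.Chars.isdigit c = true
    · simp only [stripBulletDigits, hc, if_true, List.take_succ_cons, List.mem_cons] at hx
      rcases hx with rfl | hx
      · exact hc
      · exact ih x hx
    · simp [stripBulletDigits, hc] at hx

lemma singleton_suffix_iff (c : Char) (l : List Char) : [c] <:+ l ↔ l.getLast? = some c := by
  constructor
  · rintro ⟨p, rfl⟩; exact List.getLast?_concat
  · intro h
    obtain ⟨l', rfl⟩ := List.getLast?_eq_some_iff.mp h
    exact ⟨l', rfl⟩

lemma sw_iff (c : Char) (t : List Char) :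
    PySem.Chars.startswith t [c, ' '] = true ↔ ∃ r, t = c :: ' ' :: r := by
  rw [PySem.Chars.startswith_iff]
  constructor
  · rintro ⟨r, rfl⟩; exact ⟨r, rfl⟩
  · rintro ⟨r, rfl⟩; exact ⟨r, rfl⟩

lemma split_at_space (t : List Char) (h : ' ' ∈ t) :
    ∃ a b, t = a ++ ' ' :: b ∧ ' ' ∉ a := by
  induction t with
  | nil => cases h
  | cons c r ih =>
    by_cases hc : c = ' '
    · exact ⟨[], r, by rw [hc]; rfl, by simp⟩
    · rcases List.mem_cons.mp h with h1 | h2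
      · exact absurd h1.symm hc
      · obtain ⟨a, b, rfl, ha⟩ := ih h2
        exact ⟨c :: a, b, rfl, by simp [List.mem_cons]; exact ⟨fun h' => hc h'.symm, ha⟩⟩

lemma find_space (a b : List Char) (ha : ' ' ∉ a) :
    PySem.Chars.find (a ++ ' ' :: b) [' '] = (a.length : Int) := by
  have hmem : ' ' ∈ a ++ ' ' :: b := by simp
  have hnn : 0 ≤ PySem.Chars.find (a ++ ' ' :: b) [' '] :=
    (PySem.Chars.find_nonneg_iff _ _).mpr ((List.singleton_infix_iff _ _).mpr hmem)
  obtain ⟨hpre, hmin⟩ := PySem.Chars.find_spec hnn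
  have hhead : (a ++ ' ' :: b)[(PySem.Chars.find (a ++ ' ' :: b) [' ']).toNat]? = some ' ' := by
    have := (singleton_prefix_iff ' ' _).mp hpre
    rwa [List.head?_drop] at this
  have h1 : ¬ (PySem.Chars.find (a ++ ' ' :: b) [' ']).toNat < a.length := by
    intro hlt
    rw [List.getElem?_append_left hlt] at hhead
    exact ha (List.mem_of_getElem? hhead)
  have h2 : ¬ a.length < (PySem.Chars.find (a ++ ' ' :: b) [' ']).toNat := by
    intro hlt
    refine hmin a.length hlt ?_
    rw [singleton_prefix_iff, List.head?_drop, List.getElem?_append_right (le_refl _)]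
    simp
  omega

lemma slice_two (c d : Char) (b : List Char) :
    PySem.List.slice (c :: d :: b) (some 2) none = b := by
  rw [PySem.List.slice_from _ (by decide : (0 : Int) ≤ 2)]
  rfl

lemma coreB_split (a b : List Char) (ha : ' ' ∉ a) :
    stripBulletCoreB (a ++ ' ' :: b) =
      if (a = ['-'] ∨ a = ['*'] ∨ a = ['•'])
          ∨ (PySem.Chars.strIsdigit a.dropLast
              ∧ (PySem.Chars.endswith a ['.'] ∨ PySem.Chars.endswith a [')']))
      then PySem.Chars.strip b else a ++ ' ' :: b := by
  have hfirst : PySem.List.slice (a ++ ' ' :: b) none (some ((a.length : Int))) = a := by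
    rw [PySem.List.slice_to _ (Int.natCast_nonneg _)]
    simp only [Int.toNat_natCast]
    exact List.take_left
  have hrest : PySem.List.slice (a ++ ' ' :: b) (some ((a.length : Int) + 1)) none = b := by
    rw [show ((a.length : Int) + 1) = (((a.length + 1 : Nat)) : Int) by push_cast; ring]
    have h2 : a ++ ' ' :: b = (a ++ [' ']) ++ b := by simp
    have h3 : a.length + 1 = (a ++ [' ']).length := by simp
    rw [PySem.List.slice_from _ (Int.natCast_nonneg _)]
    simp only [Int.toNat_natCast]
    rw [h2, h3, List.drop_left]
  have hdl : PySem.List.slice a none (some (-1)) = a.dropLast := by simp [pysem]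
  simp only [stripBulletCoreB, find_space a b ha, hfirst, hrest, hdl]
  rw [if_neg (by omega)]

lemma core_eq (t : List Char) : stripBulletCoreA t = stripBulletCoreB t := by
  by_cases hsp : ' ' ∈ t
  · obtain ⟨a, b, rfl, ha⟩ := split_at_space t hsp
    rw [coreB_split a b ha]
    by_cases h1 : a = ['-']
    · subst h1
      rw [if_pos (Or.inl (Or.inl rfl))]
      have hsw : PySem.Chars.startswith ('-' :: ' ' :: b) ['-', ' '] = true :=
        (sw_iff _ _).mpr ⟨b, rfl⟩
      simp only [List.cons_append, List.nil_append, stripBulletCoreA, hsw, if_true, slice_two]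
    · by_cases h2 : a = ['*']
      · subst h2
        rw [if_pos (Or.inl (Or.inr (Or.inl rfl)))]
        have hsw1 : PySem.Chars.startswith ('*' :: ' ' :: b) ['-', ' '] = false := by
          refine eq_false_of_ne_true fun h => ?_
          obtain ⟨r, hr⟩ := (sw_iff _ _).mp h; simp at hr
        have hsw : PySem.Chars.startswith ('*' :: ' ' :: b) ['*', ' '] = true :=
          (sw_iff _ _).mpr ⟨b, rfl⟩
        simp only [List.cons_append, List.nil_append, stripBulletCoreA, hsw1, hsw,
          Bool.false_eq_true, if_false, if_true, slice_two]
      · by_cases h3 : a = ['•']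
        · subst h3
          rw [if_pos (Or.inl (Or.inr (Or.inr rfl)))]
          have hsw1 : PySem.Chars.startswith ('•' :: ' ' :: b) ['-', ' '] = false := by
            refine eq_false_of_ne_true fun h => ?_
            obtain ⟨r, hr⟩ := (sw_iff _ _).mp h; simp at hr
          have hsw2 : PySem.Chars.startswith ('•' :: ' ' :: b) ['*', ' '] = false := by
            refine eq_false_of_ne_true fun h => ?_
            obtain ⟨r, hr⟩ := (sw_iff _ _).mp h; simp at hr
          have hsw : PySem.Chars.startswith ('•' :: ' ' :: b) ['•', ' '] = true :=
            (sw_iff _ _).mpr ⟨b, rfl⟩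
          simp only [List.cons_append, List.nil_append, stripBulletCoreA, hsw1, hsw2, hsw,
            Bool.false_eq_true, if_false, if_true, slice_two]
        · by_cases hdg : PySem.Chars.strIsdigit a.dropLast = true
              ∧ (PySem.Chars.endswith a ['.'] = true ∨ PySem.Chars.endswith a [')'] = true)
          · -- the numbered-bullet case: a = digits ++ [punct]
            obtain ⟨hdig, hpunct⟩ := hdg
            have hpcval : ∃ pc, a.getLast? = some pc ∧ (pc = '.' ∨ pc = ')') := by
              rcases hpunct with h | h
              · exact ⟨'.', (singleton_suffix_iff _ _).mp ((PySem.Chars.endswith_iff _ _).mp h), Or.inl rfl⟩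
              · exact ⟨')', (singleton_suffix_iff _ _).mp ((PySem.Chars.endswith_iff _ _).mp h), Or.inr rfl⟩
            obtain ⟨pc, hlast, hpc⟩ := hpcval
            obtain ⟨ds, rfl⟩ := List.getLast?_eq_some_iff.mp hlast
            have hdl : (ds ++ [pc]).dropLast = ds := by simp
            rw [hdl] at hdig
            have hdsne : ds ≠ [] := by
              intro h; rw [h] at hdig; simp [PySem.Chars.strIsdigit] at hdig
            have hdsdig : ∀ c ∈ ds, PySem.Chars.isdigit c = true := by
              intro c hc
              have h' := hdig
              simp only [PySem.Chars.strIsdigit, Bool.and_eq_true, List.all_eq_true] at h'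
              exact h'.2 c hc
            have hpcnd : PySem.Chars.isdigit pc = false := by
              rcases hpc with rfl | rfl <;> decide
            rw [if_pos (Or.inr ⟨by rw [hdl]; exact hdig, hpunct⟩)]
            have hteq : (ds ++ [pc]) ++ ' ' :: b = ds ++ pc :: ' ' :: b := by simp
            rw [hteq]
            have hscan : stripBulletDigits (ds ++ pc :: ' ' :: b) = ds.length :=
              stripBulletDigits_append ds _ hdsdig
                (by intro c hc; simp at hc; rw [← hc]; exact hpcnd)
            have hnb : ∀ c : Char, PySem.Chars.isdigit c = false →
                PySem.Chars.startswith (ds ++ pc :: ' ' :: b) [c, ' '] = false := by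
              intro c hcnd
              refine eq_false_of_ne_true fun h => ?_
              obtain ⟨r, hr⟩ := (sw_iff _ _).mp h
              cases ds with
              | nil => exact absurd rfl hdsne
              | cons d0 ds' =>
                have hd0dig : PySem.Chars.isdigit d0 = true := hdsdig d0 (by simp)
                simp only [List.cons_append, List.cons.injEq] at hr
                rw [hr.1] at hd0dig
                rw [hd0dig] at hcnd
                exact absurd hcnd (by simp)
            have hg1 : (ds ++ pc :: ' ' :: b)[ds.length]? = some pc := by
              rw [List.getElem?_append_right (le_refl _)]; simp
            have hg2 : (ds ++ pc :: ' ' :: b)[ds.length + 1]? = some ' ' := by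
              rw [List.getElem?_append_right (by omega)]
              simp
            have hcond : 0 < stripBulletDigits (ds ++ pc :: ' ' :: b)
                ∧ stripBulletDigits (ds ++ pc :: ' ' :: b) + 1 < (ds ++ pc :: ' ' :: b).length
                ∧ (PySem.List.pyGet? (ds ++ pc :: ' ' :: b) ((stripBulletDigits (ds ++ pc :: ' ' :: b) : Nat) : Int) = some '.'
                    ∨ PySem.List.pyGet? (ds ++ pc :: ' ' :: b) ((stripBulletDigits (ds ++ pc :: ' ' :: b) : Nat) : Int) = some ')')
                ∧ PySem.List.pyGet? (ds ++ pc :: ' ' :: b) (((stripBulletDigits (ds ++ pc :: ' ' :: b) : Nat) : Int) + 1) = some ' ' := by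
              rw [hscan]
              refine ⟨List.length_pos_iff.mpr hdsne, ?_, ?_, ?_⟩
              · simp only [List.length_append, List.length_cons]
                omega
              · rcases hpc with rfl | rfl
                · exact Or.inl (by rw [PySem.List.pyGet?_natCast]; exact hg1)
                · exact Or.inr (by rw [PySem.List.pyGet?_natCast]; exact hg1)
              · rw [show (((ds.length : Nat) : Int) + 1) = ((ds.length + 1 : Nat) : Int) by push_cast; ring]
                rw [PySem.List.pyGet?_natCast]
                exact hg2
            simp only [stripBulletCoreA, hnb '-' (by decide), hnb '*' (by decide),
              hnb '•' (by decide), Bool.false_eq_true, if_false]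
            rw [if_pos hcond, hscan]
            rw [show ((ds.length : Int) + 2) = (((ds.length + 2 : Nat)) : Int) by push_cast; ring]
            have he2 : ds ++ pc :: ' ' :: b = (ds ++ [pc, ' ']) ++ b := by simp
            have he3 : ds.length + 2 = (ds ++ [pc, ' ']).length := by simp
            rw [PySem.List.slice_from _ (Int.natCast_nonneg _)]
            simp only [Int.toNat_natCast]
            rw [he2, he3, List.drop_left]
          · -- neither form: both sides return the input unchanged
            rw [if_neg (by
              rintro (h | h)
              · rcases h with h | h | h
                · exact h1 h
                · exact h2 h
                · exact h3 h
              · exact hdg ⟨h.1, by rcases h.2 with h' | h'; exact Or.inl h'; exact Or.inr h'⟩)]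
            have hnb : ∀ c : Char, c ≠ ' ' → a ≠ [c] →
                PySem.Chars.startswith (a ++ ' ' :: b) [c, ' '] = false := by
              intro c hc hac
              refine eq_false_of_ne_true fun h => ?_
              obtain ⟨r, hr⟩ := (sw_iff _ _).mp h
              cases a with
              | nil => simp at hr; exact absurd hr.1.symm hc
              | cons x a' =>
                cases a' with
                | nil =>
                  simp only [List.cons_append, List.nil_append, List.cons.injEq] at hr
                  exact hac (by rw [hr.1])
                | cons y a'' =>
                  simp only [List.cons_append, List.cons.injEq] at hr
                  exact absurd (show ' ' ∈ x :: y :: a'' by simp [hr.2.1]) ha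
            have hnd : ¬ (0 < stripBulletDigits (a ++ ' ' :: b)
                ∧ stripBulletDigits (a ++ ' ' :: b) + 1 < (a ++ ' ' :: b).length
                ∧ (PySem.List.pyGet? (a ++ ' ' :: b) ((stripBulletDigits (a ++ ' ' :: b) : Nat) : Int) = some '.'
                    ∨ PySem.List.pyGet? (a ++ ' ' :: b) ((stripBulletDigits (a ++ ' ' :: b) : Nat) : Int) = some ')')
                ∧ PySem.List.pyGet? (a ++ ' ' :: b) (((stripBulletDigits (a ++ ' ' :: b) : Nat) : Int) + 1) = some ' ') := by
              rintro ⟨hk, hlen, hpcor, hsp2⟩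
              rw [show (((stripBulletDigits (a ++ ' ' :: b) : Nat) : Int) + 1)
                  = ((stripBulletDigits (a ++ ' ' :: b) + 1 : Nat) : Int) by push_cast; ring] at hsp2
              rw [PySem.List.pyGet?_natCast] at hpcor
              rw [PySem.List.pyGet?_natCast] at hsp2
              obtain ⟨pc, hg, hpc⟩ : ∃ pc, (a ++ ' ' :: b)[stripBulletDigits (a ++ ' ' :: b)]? = some pc
                  ∧ (pc = '.' ∨ pc = ')') := by
                rcases hpcor with h | h
                · exact ⟨'.', h, Or.inl rfl⟩
                · exact ⟨')', h, Or.inr rfl⟩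
              set k := stripBulletDigits (a ++ ' ' :: b) with hkdef
              have hspace_at : (a ++ ' ' :: b)[a.length]? = some ' ' := by
                rw [List.getElem?_append_right (le_refl _)]; simp
              have htake := stripBulletDigits_take (a ++ ' ' :: b)
              have hdigat : ∀ i < k, ∀ c, (a ++ ' ' :: b)[i]? = some c → PySem.Chars.isdigit c = true := by
                intro i hi c hgc
                refine htake c (List.mem_of_getElem? (i := i) ?_)
                rw [List.getElem?_take_of_lt hi]
                exact hgc
              have haeq : a.length = k + 1 := by
                rcases lt_trichotomy a.length k with h | h | h
                · have := hdigat a.length h ' ' hspace_at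
                  exact absurd this (by decide)
                · rw [← h] at hg
                  rw [hspace_at] at hg
                  rcases hpc with rfl | rfl <;> simp at hg
                · rcases Nat.lt_or_ge (k + 1) a.length with h' | h'
                  · rw [List.getElem?_append_left h'] at hsp2
                    exact absurd (List.mem_of_getElem? hsp2) ha
                  · omega
              have htk : (a ++ ' ' :: b).take a.length = a := List.take_left
              have hdla : a.dropLast = (a ++ ' ' :: b).take k := by
                have h0 : a.dropLast = ((a ++ ' ' :: b).take a.length).dropLast := by rw [htk]
                rw [h0, List.dropLast_take (by simp only [List.length_append, List.length_cons]; omega), haeq]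
                simp
              have hdig : PySem.Chars.strIsdigit a.dropLast = true := by
                rw [hdla]
                have hlen' : ((a ++ ' ' :: b).take k).length = k := by
                  rw [List.length_take]
                  simp only [List.length_append, List.length_cons]
                  omega
                simp only [PySem.Chars.strIsdigit, Bool.and_eq_true, Bool.not_eq_true',
                  List.isEmpty_eq_false_iff, List.all_eq_true]
                refine ⟨?_, fun c hc => htake c hc⟩
                intro hnil
                rw [hnil] at hlen'
                simp at hlen'
                omega
              have hglast : a.getLast? = some pc := by
                have h0 : a.getLast? = ((a ++ ' ' :: b).take a.length).getLast? := by rw [htk]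
                rw [h0, List.getLast?_take, if_neg (by omega), haeq]
                simp only [Nat.add_sub_cancel]
                rw [hg]
                rfl
              have hends : PySem.Chars.endswith a ['.'] = true ∨ PySem.Chars.endswith a [')'] = true := by
                rcases hpc with rfl | rfl
                · exact Or.inl ((PySem.Chars.endswith_iff _ _).mpr ((singleton_suffix_iff _ _).mpr hglast))
                · exact Or.inr ((PySem.Chars.endswith_iff _ _).mpr ((singleton_suffix_iff _ _).mpr hglast))
              exact hdg ⟨hdig, hends⟩
            simp only [stripBulletCoreA, hnb '-' (by decide) h1, hnb '*' (by decide) h2,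
              hnb '•' (by decide) h3, Bool.false_eq_true, if_false]
            rw [if_neg hnd]
  · -- no space anywhere: both sides return the input unchanged
    have hfind : PySem.Chars.find t [' '] = -1 :=
      (PySem.Chars.find_eq_neg_one_iff _ _).mpr (by rw [List.singleton_infix_iff]; exact hsp)
    have hB : stripBulletCoreB t = t := by simp [stripBulletCoreB, hfind]
    rw [hB]
    have hnb : ∀ c : Char, PySem.Chars.startswith t [c, ' '] = false := by
      intro c
      refine eq_false_of_ne_true fun h => ?_
      obtain ⟨r, rfl⟩ := (sw_iff c t).mp h
      simp at hsp
    have hnd : ¬ (0 < stripBulletDigits t ∧ stripBulletDigits t + 1 < t.length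
        ∧ (PySem.List.pyGet? t ((stripBulletDigits t : Nat) : Int) = some '.'
            ∨ PySem.List.pyGet? t ((stripBulletDigits t : Nat) : Int) = some ')')
        ∧ PySem.List.pyGet? t (((stripBulletDigits t : Nat) : Int) + 1) = some ' ') := by
      rintro ⟨-, -, -, hget⟩
      rw [show (((stripBulletDigits t : Nat) : Int) + 1) = ((stripBulletDigits t + 1 : Nat) : Int) by push_cast; ring] at hget
      rw [PySem.List.pyGet?_natCast] at hget
      exact hsp (List.mem_of_getElem? hget)
    simp only [stripBulletCoreA, hnb '-', hnb '*', hnb '•', Bool.false_eq_true, if_false]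
    rw [if_neg hnd]

-- ===== VERDICT (by name: the statement is the Claim_ definition above) =====
theorem strip_bullet_py_spec : Claim_equal_strip_bullet_py := by
  intro line _
  unfold Spec_strip_bullet_py strip_bullet_py strip_bullet_py_alt
  rw [core_eq]
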